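-- pv_equiv track=rewrite | github.com/1cbyc/view0x | python/analyzers/dependency_analyzer.py | find_inheritance_chain
-- ===== SOURCE A (Python) =====
-- from typing import Dict, List, Any, Optional, Set, Tuple
--
-- def find_inheritance_chain(contract_name: str, graph: Dict[str, List[str]]) -> List[str]:
--     """Find complete inheritance chain for a contract"""
--     chain: List[str] = []
--     visited: Set[str] = set()
--
--     def dfs(node: str):
--         if node in visited:
--             return
--         visited.add(node)
--         chain.append(node)
--
--         for parent in graph.get(node, []):
--             dfs(parent)
--
--     dfs(contract_name)
--     return chain
-- ===== SOURCE B (Python) =====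
-- from typing import Dict, List
--
-- def find_inheritance_chain(contract_name: str, graph: Dict[str, List[str]]) -> List[str]:
--     """Find complete inheritance chain for a contract (iterative DFS)."""
--     chain: List[str] = []
--     visited = set()
--     stack = [contract_name]
--     while stack:
--         node = stack.pop()
--         if node in visited:
--             continue
--         visited.add(node)
--         chain.append(node)
--         # push parents reversed so they are popped in original order (preorder)
--         stack.extend(reversed(graph.get(node, [])))
--     return chain
-- ===== Notes on version B (the rewrite author's own statement) =====
-- stated objective: alternative
-- what changed: Replaced the nested recursive dfs closure (which mutates enclosing chain/visited and can hit RecursionError on deep graphs) by an iterative while loop over an explicit stack, pushing parents in reversed order to preserve the exact preorder.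
import Mathlib
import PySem

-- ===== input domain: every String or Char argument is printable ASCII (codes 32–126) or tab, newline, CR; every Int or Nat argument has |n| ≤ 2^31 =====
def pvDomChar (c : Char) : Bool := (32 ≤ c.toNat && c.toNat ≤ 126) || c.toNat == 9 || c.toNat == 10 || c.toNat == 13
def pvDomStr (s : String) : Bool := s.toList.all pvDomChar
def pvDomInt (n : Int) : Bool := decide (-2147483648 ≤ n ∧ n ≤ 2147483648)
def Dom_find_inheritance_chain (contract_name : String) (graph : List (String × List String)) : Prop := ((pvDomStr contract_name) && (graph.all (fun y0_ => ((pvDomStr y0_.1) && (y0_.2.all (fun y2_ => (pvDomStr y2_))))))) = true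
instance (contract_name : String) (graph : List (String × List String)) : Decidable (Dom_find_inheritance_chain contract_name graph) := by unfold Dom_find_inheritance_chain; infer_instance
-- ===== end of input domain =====

-- B replaces A's nested recursive dfs closure (mutating the enclosing chain/visited) by an
-- iterative while loop over an explicit stack, pushing parents reversed; same return value
-- (objective: alternative).

-- graph.get(node, []) on the assoc-list dict: first matching key, default [] (exact: first match per convention)
def pvGet (graph : List (String × List String)) (n : String) : List String :=
  ((graph.find? (fun p => p.1 == n)).map Prod.snd).getD []

-- measure used by port A's termination (cited in decreasing_by)
def pvUnvisited (graph : List (String × List String)) (vis : PySem.Set String) : Nat :=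
  ((graph.map Prod.fst).filter (fun x => !(PySem.Set.contains vis x))).length

theorem pv_contains_add_self (vis : PySem.Set String) (n : String) :
    PySem.Set.contains (PySem.Set.add vis n) n = true := by
  simp [PySem.Set.add, PySem.Set.contains]
  split <;> simp_all [List.contains_eq_mem]

theorem pv_contains_add_of_ne (vis : PySem.Set String) (n x : String) (h : x ≠ n) :
    PySem.Set.contains (PySem.Set.add vis n) x = PySem.Set.contains vis x := by
  simp [PySem.Set.add, PySem.Set.contains]
  split <;> simp_all [List.contains_eq_mem]

theorem pv_getD_of_not_key (graph : List (String × List String)) (n : String)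
    (h : n ∉ graph.map Prod.fst) : pvGet graph n = [] := by
  unfold pvGet
  rw [List.find?_eq_none.mpr]
  · rfl
  · intro p hp
    simp
    intro e
    exact h (e ▸ List.mem_map_of_mem hp)

theorem pv_filter_length_le {l : List String} {p q : String → Bool}
    (h : ∀ x ∈ l, q x = true → p x = true) :
    (l.filter q).length ≤ (l.filter p).length := by
  induction l with
  | nil => simp
  | cons a t ih =>
    have ht : ∀ x ∈ t, q x = true → p x = true := fun x hx => h x (List.mem_cons_of_mem a hx)
    have h1 := ih ht
    by_cases hq : q a = true
    · have hp := h a (List.mem_cons_self) hq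
      simp [List.filter_cons, hq, hp]
      exact h1
    · by_cases hp : p a = true <;> simp [List.filter_cons, hq, hp] <;> omega

theorem pv_filter_length_lt {l : List String} {p q : String → Bool}
    (h : ∀ x ∈ l, q x = true → p x = true)
    (a : String) (ha : a ∈ l) (hpa : p a = true) (hqa : q a = false) :
    (l.filter q).length < (l.filter p).length := by
  induction l with
  | nil => simp at ha
  | cons b t ih =>
    have ht : ∀ x ∈ t, q x = true → p x = true := fun x hx => h x (List.mem_cons_of_mem b hx)
    rcases List.mem_cons.mp ha with rfl | hat
    · simp [List.filter_cons, hqa, hpa]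
      have := pv_filter_length_le (l := t) (p := p) (q := q) ht
      omega
    · by_cases hq : q b = true
      · have hp := h b (List.mem_cons_self) hq
        simp [List.filter_cons, hq, hp]
        exact ih ht hat
      · have hlt := ih ht hat
        by_cases hp : p b = true <;> simp [List.filter_cons, hq, hp] <;> omega

-- unvisited count decreases when an unvisited key gets marked
theorem pv_unvisited_lt (graph : List (String × List String)) (vis : PySem.Set String)
    (n : String) (hn : n ∈ graph.map Prod.fst) (hv : n ∉ vis) :
    pvUnvisited graph (PySem.Set.add vis n) < pvUnvisited graph vis := by
  apply pv_filter_length_lt (a := n) _ hn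
  · simp [PySem.Set.contains]
    exact hv
  · simp [pv_contains_add_self]
  · intro x _ hx
    by_cases hxn : x = n
    · subst hxn; simp [pv_contains_add_self] at hx
    · rw [pv_contains_add_of_ne _ _ _ hxn] at hx; exact hx

-- unvisited count unchanged when the marked node is not a key
theorem pv_unvisited_eq (graph : List (String × List String)) (vis : PySem.Set String)
    (n : String) (hn : n ∉ graph.map Prod.fst) :
    pvUnvisited graph (PySem.Set.add vis n) = pvUnvisited graph vis := by
  unfold pvUnvisited
  congr 1
  apply List.filter_congr
  intro x hx
  have : x ≠ n := fun e => hn (e ▸ hx)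
  rw [pv_contains_add_of_ne _ _ _ this]

-- ===== PORT A =====
-- A's nested recursive dfs: 'dfs node' = visit node then dfs each parent in order.
-- Rendered as the obvious recursion over the pending-calls list (the recursion's
-- continuation): the head is the current dfs argument, the tail the pending calls.
def pvDfsA (graph : List (String × List String)) :
    List String → PySem.Set String → List String → List String
  | [], _, chain => chain
  | n :: rest, vis, chain =>
    if PySem.Set.contains vis n then
      pvDfsA graph rest vis chain
    else
      pvDfsA graph ((pvGet graph n) ++ rest) (PySem.Set.add vis n) (chain ++ [n])
  termination_by stack vis _ => (pvUnvisited graph vis, stack.length)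
  decreasing_by
  · exact Prod.Lex.right _ (by simp)
  · rename_i hv
    simp at hv
    by_cases hk : n ∈ graph.map Prod.fst
    · exact Prod.Lex.left _ _ (pv_unvisited_lt graph vis n hk hv)
    · rw [pv_getD_of_not_key graph n hk, pv_unvisited_eq graph vis n hk]
      exact Prod.Lex.right _ (by simp)

def find_inheritance_chain (contract_name : String) (graph : List (String × List String)) : List String :=
  pvDfsA graph [contract_name] PySem.Set.empty []

-- ===== PORT B =====
-- Source B's while loop, rendered with a fuel counter (the standard total rendering of a
-- while loop; pvStep below is an upper bound on the number of iterations, proved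
-- sufficient in the lemmas).  Each iteration pops the LAST stack element; if visited
-- it skips, else it marks the node, records it, and pushes its parents reversed.
def pvStep (graph : List (String × List String)) (vis : PySem.Set String) : Nat :=
  (((graph.map Prod.fst).dedup.filter (fun k => !(PySem.Set.contains vis k))).map
    (fun k => (pvGet graph k).length)).sum

def pvWhileB (graph : List (String × List String)) :
    Nat → List String → PySem.Set String → List String → List String
  | _, [], _, chain => chain
  | 0, _ :: _, _, chain => chain
  | fuel + 1, h :: t, vis, chain =>
    let node := t.getLastD h
    let stack := (h :: t).dropLast
    if PySem.Set.contains vis node then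
      pvWhileB graph fuel stack vis chain
    else
      pvWhileB graph fuel (stack ++ (pvGet graph node).reverse)
        (PySem.Set.add vis node) (chain ++ [node])

def find_inheritance_chain_alt (contract_name : String) (graph : List (String × List String)) : List String :=
  pvWhileB graph (1 + pvStep graph PySem.Set.empty) [contract_name] PySem.Set.empty []

-- ===== PRECONDITION & SPEC =====
def Spec_find_inheritance_chain (contract_name : String) (graph : List (String × List String)) (out : List String) : Prop := out = find_inheritance_chain_alt contract_name graph
instance (contract_name : String) (graph : List (String × List String)) (out : List String) : Decidable (Spec_find_inheritance_chain contract_name graph out) := by unfold Spec_find_inheritance_chain; infer_instance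

-- ===== CLAIM (what is proved, stated in full; the proofs are below) =====
def Claim_equal_find_inheritance_chain : Prop := ∀ (contract_name : String) (graph : List (String × List String)), Dom_find_inheritance_chain contract_name graph → Spec_find_inheritance_chain contract_name graph (find_inheritance_chain contract_name graph)

-- ===== LEMMAS AND PROOFS =====

theorem pv_cons_eq_dropLast_append (h : String) (t : List String) :
    h :: t = (h :: t).dropLast ++ [t.getLastD h] := by
  induction t generalizing h with
  | nil => rfl
  | cons a t ih =>
    rw [List.getLastD_cons, List.dropLast_cons₂, List.cons_append]
    exact congrArg (h :: ·) (ih a)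

-- pvStep after marking an unvisited key n shrinks by exactly |pvGet n|
theorem pv_sum_filter_add {l : List String} (f : String → Nat) (vis : PySem.Set String)
    (n : String) (hnd : l.Nodup) (hn : n ∈ l) (hv : PySem.Set.contains vis n = false) :
    ((l.filter (fun k => !(PySem.Set.contains (PySem.Set.add vis n) k))).map f).sum + f n
      = ((l.filter (fun k => !(PySem.Set.contains vis k))).map f).sum := by
  induction l with
  | nil => simp at hn
  | cons a t ih =>
    by_cases hae : a = n
    · subst hae
      have hat : a ∉ t := (List.nodup_cons.mp hnd).1
      have hft : List.filter (fun k => !(PySem.Set.contains (PySem.Set.add vis a) k)) t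
          = List.filter (fun k => !(PySem.Set.contains vis k)) t := by
        apply List.filter_congr
        intro x hx
        have : x ≠ a := fun e => hat (e ▸ hx)
        rw [pv_contains_add_of_ne _ _ _ this]
      have h1 : (!(PySem.Set.contains (PySem.Set.add vis a) a)) = false := by
        rw [pv_contains_add_self]; rfl
      have h2 : (!(PySem.Set.contains vis a)) = true := by rw [hv]; rfl
      rw [List.filter_cons, List.filter_cons, h1, h2, hft]
      simp
      omega
    · have hna : a ≠ n := hae
      have hn' : n ∈ t := by
        rcases List.mem_cons.mp hn with h | h
        · exact absurd h.symm hna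
        · exact h
      have ih' := ih (List.nodup_cons.mp hnd).2 hn'
      rw [List.filter_cons, List.filter_cons, pv_contains_add_of_ne vis n a hna]
      by_cases ha : PySem.Set.contains vis a = true
      · rw [if_neg (by rw [ha]; decide), if_neg (by rw [ha]; decide)]
        exact ih'
      · have hb : (!(PySem.Set.contains vis a)) = true := by
          rw [Bool.eq_false_iff.mpr ha]; rfl
        rw [if_pos hb, if_pos hb]
        simp only [List.map_cons, List.sum_cons]
        omega

theorem pv_step_add_key (graph : List (String × List String)) (vis : PySem.Set String)
    (n : String) (hn : n ∈ graph.map Prod.fst) (hv : PySem.Set.contains vis n = false) :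
    pvStep graph (PySem.Set.add vis n) + (pvGet graph n).length = pvStep graph vis := by
  unfold pvStep
  exact pv_sum_filter_add _ vis n (List.nodup_dedup _) (List.mem_dedup.mpr hn) hv

theorem pv_step_add_nonkey (graph : List (String × List String)) (vis : PySem.Set String)
    (n : String) (hn : n ∉ graph.map Prod.fst) :
    pvStep graph (PySem.Set.add vis n) = pvStep graph vis := by
  unfold pvStep
  congr 2
  apply List.filter_congr
  intro x hx
  have : x ≠ n := fun e => hn (e ▸ List.mem_dedup.mp hx)
  rw [pv_contains_add_of_ne _ _ _ this]

-- with enough fuel, B's while loop on a stack equals A's dfs on the reversed stack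
theorem pvWhileB_eq_pvDfsA (graph : List (String × List String)) :
    ∀ fuel stack vis chain, stack.length + pvStep graph vis ≤ fuel →
      pvWhileB graph fuel stack vis chain = pvDfsA graph stack.reverse vis chain := by
  intro fuel
  induction fuel with
  | zero =>
    intro stack vis chain hf
    have : stack = [] := List.eq_nil_of_length_eq_zero (by omega)
    subst this
    rw [pvWhileB, List.reverse_nil, pvDfsA]
  | succ fuel ih =>
    intro stack vis chain hf
    match stack with
    | [] => rw [pvWhileB, List.reverse_nil, pvDfsA]
    | h :: t =>
      have hlen : ((h :: t).dropLast).length = t.length := by simp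
      have hrev : (h :: t).reverse = t.getLastD h :: ((h :: t).dropLast).reverse := by
        conv_lhs => rw [pv_cons_eq_dropLast_append h t]
        simp
      rw [pvWhileB, hrev, pvDfsA]
      simp only [List.length_cons] at hf
      by_cases hv : PySem.Set.contains vis (t.getLastD h) = true
      · simp only [hv, if_true]
        exact ih _ vis chain (by omega)
      · simp only [Bool.not_eq_true] at hv
        simp only [hv, Bool.false_eq_true, if_false]
        rw [ih _ _ _ ?_]
        · simp
        · rw [List.length_append, List.length_reverse, hlen]
          by_cases hk : (t.getLastD h) ∈ graph.map Prod.fst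
          · have := pv_step_add_key graph vis _ hk hv
            omega
          · rw [pv_step_add_nonkey graph vis _ hk, pv_getD_of_not_key graph _ hk]
            simp
            omega

-- ===== VERDICT (by name: the statement is the Claim_ definition above) =====
theorem find_inheritance_chain_spec : Claim_equal_find_inheritance_chain := by
  intro c g _
  unfold Spec_find_inheritance_chain find_inheritance_chain find_inheritance_chain_alt
  rw [pvWhileB_eq_pvDfsA g (1 + pvStep g PySem.Set.empty) [c] PySem.Set.empty [] (by simp)]
  rfl
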